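-- pv_equiv track=rewrite | github.com/KapitanPL/CMaker | vcxproj_parser.py | _commonProperties
-- ===== SOURCE A (Python) =====
-- from functools import reduce
--
-- def _commonProperties(properties: dict):
--     commonPropertiePerArch = dict()
--     for arch in properties.keys():
--         commonPropertiePerArch[arch] = reduce(set.intersection, properties[arch].values())
--     totalCommonProperties = reduce(set.intersection, commonPropertiePerArch.values())
--     for arch in commonPropertiePerArch.keys():
--         commonPropertiePerArch[arch] = commonPropertiePerArch[arch].difference(totalCommonProperties);
--     for arch in properties.keys():
--         for conf in properties[arch].keys():
--             properties[arch][conf] = properties[arch][conf].difference(totalCommonProperties);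
--     for arch in commonPropertiePerArch.keys():
--         for conf in properties[arch].keys():
--             properties[arch][conf] = properties[arch][conf].difference(commonPropertiePerArch[arch]);
--     properties['All'] = commonPropertiePerArch
--     properties['All']['All'] = totalCommonProperties
--     return properties
-- ===== SOURCE B (Python) =====
-- def _commonProperties(properties: dict):
--     # Element-wise classification instead of set algebra: each property is tested
--     # with membership predicates; no intermediate intersection/difference sets are
--     # built. Returns a NEW dict (A mutates `properties` in place; return values agree).
--     def archCommon(p, confs):
--         return all(p in s for s in confs.values())
--
--     def totalCommon(p):
--         return all(archCommon(p, confs) for confs in properties.values())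
--
--     out = {arch: {conf: {p for p in s if not archCommon(p, confs)}
--                   for conf, s in confs.items()}
--            for arch, confs in properties.items()}
--     out['All'] = {arch: {p for p in next(iter(confs.values()))
--                          if archCommon(p, confs) and not totalCommon(p)}
--                   for arch, confs in properties.items()}
--     firstConfs = next(iter(properties.values()))
--     out['All']['All'] = {p for p in next(iter(firstConfs.values())) if totalCommon(p)}
--     return out
-- ===== Notes on version B (the rewrite author's own statement) =====
-- stated objective: alternative
-- what changed: B replaces A's set-algebra pipeline (reduce(set.intersection) per arch and overall, then three in-place difference passes) by element-wise classification: two membership predicates archCommon/totalCommon decide each property's class, every output set is a single filtered comprehension of its source set, and the result is built as a new dict; intersection/difference sets are never materialised.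
import Mathlib
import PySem

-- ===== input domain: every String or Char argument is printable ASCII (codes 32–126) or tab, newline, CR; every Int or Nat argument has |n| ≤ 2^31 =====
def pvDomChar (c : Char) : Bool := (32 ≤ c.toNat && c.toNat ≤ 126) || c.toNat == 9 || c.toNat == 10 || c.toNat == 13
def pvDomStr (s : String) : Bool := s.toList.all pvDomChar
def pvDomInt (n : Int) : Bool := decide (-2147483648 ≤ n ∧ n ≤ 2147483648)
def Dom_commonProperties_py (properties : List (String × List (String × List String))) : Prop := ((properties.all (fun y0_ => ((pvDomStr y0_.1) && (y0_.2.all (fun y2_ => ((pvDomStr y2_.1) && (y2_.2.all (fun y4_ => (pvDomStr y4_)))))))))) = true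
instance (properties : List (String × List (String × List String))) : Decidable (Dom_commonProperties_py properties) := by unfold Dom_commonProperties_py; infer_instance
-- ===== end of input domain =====

-- B classifies each property element-wise with membership predicates instead of building
-- intersection/difference sets, and returns a NEW dict where A mutates `properties` in
-- place; the equivalence proved here is about the return value.

-- ===== PORT A =====
-- functools.reduce(set.intersection, vals): on an empty iterable Python raises TypeError
-- (excluded by Pre_); the [] branch is never reached under Pre_.
def pyReduceInter (vals : List (List String)) : List String :=
  match vals with
  | [] => []
  | v :: vs => vs.foldl (fun acc u => PySem.Set.inter acc u) v

def commonProperties_py (properties : List (String × List (String × List String))) : List (String × List (String × List String)) :=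
  let props0 : PySem.Dict String (PySem.Dict String (List String)) :=
    PySem.Dict.mk (properties.map (fun p => (p.1, PySem.Dict.mk p.2)))
  -- commonPropertiePerArch = dict(); for arch in properties.keys(): ... = reduce(set.intersection, properties[arch].values())
  let cpa : PySem.Dict String (List String) :=
    props0.keys.foldl (fun cpa arch =>
      cpa.insert arch (pyReduceInter ((props0.getD arch PySem.Dict.empty).values))) PySem.Dict.empty
  -- totalCommonProperties = reduce(set.intersection, commonPropertiePerArch.values())
  let total := pyReduceInter cpa.values
  -- for arch in commonPropertiePerArch.keys(): cpa[arch] = cpa[arch].difference(total)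
  let cpa := cpa.keys.foldl (fun c arch => c.insert arch (PySem.Set.diff (c.getD arch []) total)) cpa
  -- for arch in properties.keys(): for conf in properties[arch].keys(): properties[arch][conf] = properties[arch][conf].difference(total)
  let props := props0.keys.foldl (fun P arch =>
      ((P.getD arch PySem.Dict.empty).keys).foldl (fun P' conf =>
        P'.modify arch PySem.Dict.empty (fun inn => inn.insert conf (PySem.Set.diff (inn.getD conf []) total))) P) props0
  -- for arch in commonPropertiePerArch.keys(): for conf in properties[arch].keys(): properties[arch][conf] = properties[arch][conf].difference(cpa[arch])
  let props := cpa.keys.foldl (fun P arch =>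
      ((P.getD arch PySem.Dict.empty).keys).foldl (fun P' conf =>
        P'.modify arch PySem.Dict.empty (fun inn => inn.insert conf (PySem.Set.diff (inn.getD conf []) (cpa.getD arch [])))) P) props
  -- properties['All'] = commonPropertiePerArch; properties['All']['All'] = totalCommonProperties
  let props := props.insert "All" cpa
  let props := props.modify "All" PySem.Dict.empty (fun inn => inn.insert "All" total)
  props.items.map (fun p => (p.1, (p.2).items))

-- ===== PORT B =====
-- archCommon(p, confs) = all(p in s for s in confs.values())
def pvIsArchCommon (p : String) (confs : List (String × List String)) : Bool :=
  confs.all (fun q => q.2.contains p)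

-- totalCommon(p) = all(archCommon(p, confs) for confs in properties.values())
def pvIsTotalCommon (properties : List (String × List (String × List String))) (p : String) : Bool :=
  properties.all (fun r => pvIsArchCommon p r.2)

-- next(iter(d.values())): raises StopIteration on an empty dict (outside Pre_); the
-- default returned on [] only makes the function total and is never reached under Pre_.
def pvFirstVal {α : Type} (l : List (String × α)) (d : α) : α :=
  match l with
  | [] => d
  | q :: _ => q.2

def commonProperties_py_alt (properties : List (String × List (String × List String))) : List (String × List (String × List String)) :=
  -- out = {arch: {conf: {p for p in s if not archCommon(p, confs)} for conf, s in confs.items()} for arch, confs in properties.items()}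
  let out := properties.map (fun r => (r.1, r.2.map (fun q =>
      (q.1, q.2.filter (fun p => !pvIsArchCommon p r.2)))))
  -- out['All'] = {arch: {p for p in next(iter(confs.values())) if archCommon(p, confs) and not totalCommon(p)} for arch, confs in properties.items()}
  let allRow := properties.map (fun r => (r.1,
      (pvFirstVal r.2 []).filter (fun p => pvIsArchCommon p r.2 && !pvIsTotalCommon properties p)))
  let out := (PySem.Dict.mk out).insert "All" allRow
  -- firstConfs = next(iter(properties.values())); out['All']['All'] = {p for p in next(iter(firstConfs.values())) if totalCommon(p)}
  let total := (pvFirstVal (pvFirstVal properties []) []).filter (fun p => pvIsTotalCommon properties p)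
  let out := out.modify "All" [] (fun r => ((PySem.Dict.mk r).insert "All" total).items)
  out.items

-- ===== PRECONDITION & SPEC =====
-- Pre_ excludes (a) an empty dict and any arch with an empty config dict — there
-- functools.reduce gets an empty iterable and A raises TypeError — and (b) association
-- lists with duplicate arch or config keys, which do not encode a Python dict (a real
-- dict argument never has them).
def Pre_commonProperties_py (properties : List (String × List (String × List String))) : Prop :=
  properties ≠ [] ∧ (properties.map Prod.fst).Nodup ∧
    ∀ p ∈ properties, p.2 ≠ [] ∧ (p.2.map Prod.fst).Nodup
instance (properties : List (String × List (String × List String))) : Decidable (Pre_commonProperties_py properties) := by unfold Pre_commonProperties_py; infer_instance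

def pvWitness_commonProperties_py : (List (String × List (String × List String))) :=
  [("x86", [("Debug", ["a", "b"]), ("Release", ["a"])]), ("x64", [("Debug", ["a", "c"])])]

def Spec_commonProperties_py (properties : List (String × List (String × List String))) (out : List (String × List (String × List String))) : Prop := out = commonProperties_py_alt properties
instance (properties : List (String × List (String × List String))) (out : List (String × List (String × List String))) : Decidable (Spec_commonProperties_py properties out) := by unfold Spec_commonProperties_py; infer_instance

-- ===== CLAIM (what is proved, stated in full; the proofs are below) =====
def Claim_equal_commonProperties_py : Prop := ∀ (properties : List (String × List (String × List String))), Dom_commonProperties_py properties → Pre_commonProperties_py properties → Spec_commonProperties_py properties (commonProperties_py properties)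

-- ===== LEMMAS AND PROOFS =====

theorem pv_mem_unique {V : Type} (l : List (String × V)) (h : (l.map Prod.fst).Nodup)
    {k : String} {v w : V} (h1 : (k, v) ∈ l) (h2 : (k, w) ∈ l) : v = w := by
  induction l with
  | nil => cases h1
  | cons p t ih =>
    have hnd := List.nodup_cons.1 h
    rcases List.mem_cons.1 h1 with rfl | h1'
    · rcases List.mem_cons.1 h2 with h2' | h2'
      · exact (Prod.mk.injEq _ _ _ _ ▸ h2'.symm).2.symm ▸ rfl
      · exact absurd (List.mem_map.2 ⟨(k, w), h2', rfl⟩) hnd.1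
    · rcases List.mem_cons.1 h2 with rfl | h2'
      · exact absurd (List.mem_map.2 ⟨(k, v), h1', rfl⟩) hnd.1
      · exact ih hnd.2 h1' h2'

theorem pv_replace_at {V : Type} (pre rest : List (String × V)) (a : String) (e w : V)
    (hnd : ((pre ++ (a, e) :: rest).map Prod.fst).Nodup) :
    (pre ++ (a, e) :: rest).map (fun p => if p.1 == a then (a, w) else p) = pre ++ (a, w) :: rest := by
  rw [List.map_append] at hnd ⊢
  have hnd' := List.nodup_append.1 hnd
  have hpre : ∀ p ∈ pre, p.1 ≠ a := by
    intro p hp hpa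
    exact hnd'.2.2 a (hpa ▸ List.mem_map.2 ⟨p, hp, rfl⟩) a (by simp) rfl
  have hrest : ∀ p ∈ rest, p.1 ≠ a := by
    intro p hp hpa
    have h2 : (a :: rest.map Prod.fst).Nodup := by simpa using hnd'.2.1
    exact (List.nodup_cons.1 h2).1 (List.mem_map.2 ⟨p, hp, hpa⟩)
  congr 1
  · refine (List.map_congr_left ?_).trans (List.map_id _)
    intro p hp
    simp [hpre p hp]
  · rw [List.map_cons]
    simp only [BEq.rfl, if_pos]
    congr 1
    refine (List.map_congr_left ?_).trans (List.map_id _)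
    intro p hp
    simp [hrest p hp]

theorem pv_not_contains_fst {V : Type} (d : PySem.Dict String V) (k : String)
    (hc : d.contains k = false) : ∀ p ∈ d.items, p.1 ≠ k := by
  intro p hp hpk
  have : k ∈ d.keys := List.mem_map.2 ⟨p, hp, hpk⟩
  rw [← PySem.Dict.contains_iff_mem_keys, hc] at this
  cases this

theorem pv_insert_insert_same {V : Type} (d : PySem.Dict String V) (k : String) (v w : V) :
    (d.insert k v).insert k w = d.insert k w := by
  apply PySem.Dict.ext
  by_cases hc : d.contains k = true
  · rw [PySem.Dict.items_insert_of_contains _ _ hc,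
      PySem.Dict.items_insert_of_contains _ _ (PySem.Dict.contains_insert_self d k v),
      PySem.Dict.items_insert_of_contains _ _ hc, List.map_map]
    refine List.map_congr_left ?_
    intro p _
    by_cases hpk : p.1 == k
    · simp [Function.comp, hpk]
    · simp [Function.comp, hpk]
  · have hcf : d.contains k = false := by simpa using hc
    have hc2 : (d.insert k v).contains k = true := PySem.Dict.contains_insert_self _ _ _
    rw [PySem.Dict.items_insert_of_contains _ _ hc2,
      PySem.Dict.items_insert_of_not_contains _ _ hcf,
      PySem.Dict.items_insert_of_not_contains _ _ hcf, List.map_append]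
    have : d.items.map (fun p => if p.1 == k then (k, w) else p) = d.items := by
      refine (List.map_congr_left ?_).trans (List.map_id _)
      intro p hp
      simp [pv_not_contains_fst d k hcf p hp]
    rw [this]
    simp

theorem pv_insert_getD_self {V : Type} (d : PySem.Dict String V) (k : String) (e : V) (dflt : V)
    (hmem : (k, e) ∈ d.items) (hnd : d.keys.Nodup) :
    d.insert k (d.getD k dflt) = d := by
  have hget : d.getD k dflt = e := PySem.Dict.getD_of_mem_items _ hmem hnd dflt
  have hc : d.contains k = true := (PySem.Dict.contains_iff_mem_keys _ _).2 (List.mem_map.2 ⟨_, hmem, rfl⟩)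
  apply PySem.Dict.ext
  rw [hget, PySem.Dict.items_insert_of_contains _ _ hc]
  refine (List.map_congr_left ?_).trans (List.map_id _)
  intro p hp
  by_cases hpk : p.1 = k
  · have h2 : p.2 = e := pv_mem_unique d.items hnd (hpk ▸ hp) hmem
    have : p = (k, e) := by cases p; simp_all
    simp [this]
  · simp [hpk]

theorem pv_fold_build {V : Type} (f : String → V) :
    ∀ (ks : List String) (d : PySem.Dict String V), (d.keys ++ ks).Nodup →
      ks.foldl (fun c k => c.insert k (f k)) d = PySem.Dict.mk (d.items ++ ks.map (fun k => (k, f k))) := by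
  intro ks
  induction ks with
  | nil => intro d _; simp
  | cons k ks ih =>
    intro d hnd
    have hknotin : k ∉ d.keys := by
      have h := List.nodup_append.1 hnd
      intro hk
      exact h.2.2 k hk k (by simp) rfl
    have hcf : d.contains k = false := by
      rcases Bool.eq_false_or_eq_true (d.contains k) with h | h
      · exact absurd ((PySem.Dict.contains_iff_mem_keys _ _).1 h) hknotin
      · exact h
    have hitems : (d.insert k (f k)).items = d.items ++ [(k, f k)] :=
      PySem.Dict.items_insert_of_not_contains _ _ hcf
    have hkeys : (d.insert k (f k)).keys = d.keys ++ [k] := by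
      show (d.insert k (f k)).items.map Prod.fst = _
      rw [hitems, List.map_append]
      rfl
    have hnd2 : ((d.insert k (f k)).keys ++ ks).Nodup := by
      rw [hkeys, List.append_assoc, List.singleton_append]
      exact hnd
    rw [List.foldl_cons, ih _ hnd2, hitems]
    simp

theorem pv_fold_master {V : Type} (F : PySem.Dict String V → String → PySem.Dict String V)
    (h : String → V → V) (Good : V → Prop)
    (hF : ∀ (P : PySem.Dict String V) (a : String) (e : V),
      P.keys.Nodup → (a, e) ∈ P.items → Good e → F P a = P.insert a (h a e)) :
    ∀ (post pre : List (String × V)), ((pre ++ post).map Prod.fst).Nodup →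
      (∀ p ∈ post, Good p.2) →
      (post.map Prod.fst).foldl F (PySem.Dict.mk (pre ++ post)) =
        PySem.Dict.mk (pre ++ post.map (fun p => (p.1, h p.1 p.2))) := by
  intro post
  induction post with
  | nil => intro pre _ _; simp
  | cons q rest ih =>
    intro pre hnd hGood
    obtain ⟨a, e⟩ := q
    have hndk : (PySem.Dict.mk (pre ++ (a, e) :: rest)).keys.Nodup := hnd
    have hmem : (a, e) ∈ (PySem.Dict.mk (pre ++ (a, e) :: rest)).items := by
      show (a, e) ∈ pre ++ (a, e) :: rest
      simp
    have hstep : F (PySem.Dict.mk (pre ++ (a, e) :: rest)) a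
        = PySem.Dict.mk (pre ++ (a, h a e) :: rest) := by
      rw [hF _ _ _ hndk hmem (hGood (a, e) (List.mem_cons_self))]
      apply PySem.Dict.ext
      have hc : (PySem.Dict.mk (pre ++ (a, e) :: rest)).contains a = true :=
        (PySem.Dict.contains_iff_mem_keys _ _).2 (List.mem_map.2 ⟨_, hmem, rfl⟩)
      rw [PySem.Dict.items_insert_of_contains _ _ hc]
      exact pv_replace_at pre rest a e (h a e) hnd
    rw [List.map_cons, List.foldl_cons, hstep]
    have hnd2 : (((pre ++ [(a, h a e)]) ++ rest).map Prod.fst).Nodup := by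
      rw [List.append_assoc, List.singleton_append]
      simpa using hnd
    have := ih (pre ++ [(a, h a e)]) hnd2 (fun p hp => hGood p (by simp [hp]))
    rw [List.append_assoc, List.singleton_append] at this
    rw [this]
    simp

theorem pv_fold_inner_lift {V : Type} (step : V → String → V) (a : String) (dflt : V) :
    ∀ (ks : List String) (P : PySem.Dict String V), P.keys.Nodup → (∃ e, (a, e) ∈ P.items) →
      ks.foldl (fun P' c => P'.modify a dflt (fun inn => step inn c)) P
        = P.insert a (ks.foldl step (P.getD a dflt)) := by
  intro ks
  induction ks with
  | nil =>
    intro P hnd ⟨e, hmem⟩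
    exact (pv_insert_getD_self P a e dflt hmem hnd).symm
  | cons c ks ih =>
    intro P hnd ⟨e, hmem⟩
    have hc : P.contains a = true :=
      (PySem.Dict.contains_iff_mem_keys _ _).2 (List.mem_map.2 ⟨_, hmem, rfl⟩)
    have hmod : P.modify a dflt (fun inn => step inn c) = P.insert a (step (P.getD a dflt) c) := rfl
    have hnd2 : (P.insert a (step (P.getD a dflt) c)).keys.Nodup := by
      rw [PySem.Dict.keys_insert_of_contains _ _ hc]; exact hnd
    have hmem2 : (a, step (P.getD a dflt) c) ∈ (P.insert a (step (P.getD a dflt) c)).items :=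
      PySem.Dict.mem_items_insert_self _ _ _
    rw [List.foldl_cons, hmod, ih _ hnd2 ⟨_, hmem2⟩, PySem.Dict.getD_insert_self,
      pv_insert_insert_same, List.foldl_cons]

def pvM (p : List (String × List (String × List String))) : List (String × List String) :=
  p.map (fun r => (r.1, pyReduceInter (r.2.map Prod.snd)))
def pvT (p : List (String × List (String × List String))) : List String :=
  pyReduceInter ((pvM p).map Prod.snd)
def pvM2 (p : List (String × List (String × List String))) : List (String × List String) :=
  (pvM p).map (fun q => (q.1, PySem.Set.diff q.2 (pvT p)))
def pvRow (p : List (String × List (String × List String))) : List (String × List (String × List String)) :=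
  p.map (fun r => (r.1, r.2.map (fun q => (q.1, PySem.Set.diff q.2 (pyReduceInter (r.2.map Prod.snd))))))
def pvL3 (p : List (String × List (String × List String))) : List (String × PySem.Dict String (List String)) :=
  p.map (fun r => (r.1, PySem.Dict.mk (r.2.map (fun q => (q.1, PySem.Set.diff q.2 (pvT p))))))
def pvL4 (p : List (String × List (String × List String))) : List (String × PySem.Dict String (List String)) :=
  p.map (fun r => (r.1, PySem.Dict.mk (r.2.map (fun q => (q.1,
    PySem.Set.diff (PySem.Set.diff q.2 (pvT p))
      (PySem.Set.diff (pyReduceInter (r.2.map Prod.snd)) (pvT p)))))))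

theorem pv_foldl_inter_mem (vs : List (List String)) (v : List String) (x : String)
    (hx : x ∈ vs.foldl (fun acc u => PySem.Set.inter acc u) v) : x ∈ v ∧ ∀ u ∈ vs, x ∈ u := by
  induction vs generalizing v with
  | nil => simpa using hx
  | cons u us ih =>
    have h := ih (PySem.Set.inter v u) (by simpa using hx)
    have h1 := (PySem.Set.mem_inter (s := v) (t := u) (y := x)).1 h.1
    refine ⟨h1.1, ?_⟩
    intro w hw
    rcases List.mem_cons.1 hw with rfl | hw2
    · exact h1.2
    · exact h.2 w hw2

theorem pv_mem_reduceInter (vals : List (List String)) (u : List String) (hu : u ∈ vals)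
    (x : String) (hx : x ∈ pyReduceInter vals) : x ∈ u := by
  cases vals with
  | nil => cases hu
  | cons v vs =>
    have h := pv_foldl_inter_mem vs v x (by simpa [pyReduceInter] using hx)
    rcases List.mem_cons.1 hu with rfl | hu
    · exact h.1
    · exact h.2 u hu

theorem pv_diff_diff (ps total c : List String) (hsub : ∀ x ∈ total, x ∈ c) :
    PySem.Set.diff (PySem.Set.diff ps total) (PySem.Set.diff c total) = PySem.Set.diff ps c := by
  show (ps.filter _).filter _ = ps.filter _
  rw [List.filter_filter]
  refine List.filter_congr ?_
  intro x hx
  by_cases hxc : x ∈ c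
  · by_cases hxt : x ∈ total
    · simp [hxc, hxt]
    · simp [PySem.Set.mem_diff, hxc, hxt]
  · have hxt : x ∉ total := fun h => hxc (hsub x h)
    simp [PySem.Set.mem_diff, hxc, hxt]

-- reduce(set.intersection, v :: vs) as ONE filter of v
theorem pv_reduceInter_eq (v : List String) (vs : List (List String)) :
    pyReduceInter (v :: vs) = v.filter (fun x => vs.all (fun u => u.contains x)) := by
  show vs.foldl (fun acc u => PySem.Set.inter acc u) v = _
  induction vs generalizing v with
  | nil => simp
  | cons u us ih =>
    rw [List.foldl_cons, ih]
    show (v.filter _).filter _ = _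
    rw [List.filter_filter]
    refine List.filter_congr ?_
    intro x _
    simp [Bool.and_comm]

theorem pv_contains_filter (l : List String) (pred : String → Bool) (x : String) :
    (l.filter pred).contains x = (l.contains x && pred x) := by
  rw [Bool.eq_iff_iff]
  simp only [List.contains_eq_mem, Bool.and_eq_true, decide_eq_true_eq, List.mem_filter]

theorem pv_contains_reduceInter (confs : List (String × List String)) (h : confs ≠ [])
    (x : String) : (pyReduceInter (confs.map Prod.snd)).contains x = pvIsArchCommon x confs := by
  cases confs with
  | nil => exact absurd rfl h
  | cons q qs =>
    rw [List.map_cons, pv_reduceInter_eq, pv_contains_filter, List.all_map]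
    show _ = (q :: qs).all _
    rw [List.all_cons]
    rfl

theorem pv_all_mem_congr {α : Type} (l : List α) (f g : α → Bool)
    (h : ∀ x ∈ l, f x = g x) : l.all f = l.all g := by
  induction l with
  | nil => rfl
  | cons a t ih =>
    rw [List.all_cons, List.all_cons, h a List.mem_cons_self,
      ih (fun x hx => h x (List.mem_cons_of_mem a hx))]

theorem pv_contains_T (p : List (String × List (String × List String))) (hp : p ≠ [])
    (hinner : ∀ r ∈ p, r.2 ≠ []) (x : String) :
    (pvT p).contains x = pvIsTotalCommon p x := by
  cases p with
  | nil => exact absurd rfl hp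
  | cons r rs =>
    have h0 : pvT (r :: rs) = pyReduceInter (pyReduceInter (r.2.map Prod.snd)
        :: rs.map (fun s => pyReduceInter (s.2.map Prod.snd))) := by
      show pyReduceInter (((r :: rs).map _).map Prod.snd) = _
      rw [List.map_map]
      rfl
    rw [h0, pv_reduceInter_eq, pv_contains_filter,
      pv_contains_reduceInter r.2 (hinner r List.mem_cons_self) x, List.all_map]
    show (pvIsArchCommon x r.2 && rs.all fun s => (pyReduceInter (s.2.map Prod.snd)).contains x)
      = (r :: rs).all _
    rw [List.all_cons]
    congr 1
    exact pv_all_mem_congr rs _ _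
      (fun s hs => pv_contains_reduceInter s.2 (hinner s (List.mem_cons_of_mem r hs)) x)

-- B's three pieces coincide with A's canonical pieces (under Pre_)
theorem pv_T_eq (p : List (String × List (String × List String))) (hp : p ≠ [])
    (hinner : ∀ r ∈ p, r.2 ≠ []) :
    pvT p = (pvFirstVal (pvFirstVal p []) []).filter (fun x => pvIsTotalCommon p x) := by
  cases p with
  | nil => exact absurd rfl hp
  | cons r rs =>
    obtain ⟨q, qs, hr2⟩ := List.exists_cons_of_ne_nil (hinner r List.mem_cons_self)
    have hfv : pvFirstVal (pvFirstVal (r :: rs) ([] : List (String × List String))) [] = q.2 := by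
      show pvFirstVal r.2 [] = q.2
      rw [hr2]
      rfl
    have h0 : pvT (r :: rs) = pyReduceInter (pyReduceInter (r.2.map Prod.snd)
        :: rs.map (fun s => pyReduceInter (s.2.map Prod.snd))) := by
      show pyReduceInter (((r :: rs).map _).map Prod.snd) = _
      rw [List.map_map]
      rfl
    rw [h0, pv_reduceInter_eq, hfv]
    conv_lhs => rw [hr2, List.map_cons, pv_reduceInter_eq, List.filter_filter]
    refine List.filter_congr ?_
    intro x hx
    have hq : q.2.contains x = true := by
      rw [List.contains_eq_mem]; exact decide_eq_true hx
    have hA : pvIsArchCommon x r.2 = (qs.map Prod.snd).all (fun u => u.contains x) := by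
      rw [hr2]
      show (q.2.contains x && qs.all _) = _
      rw [hq, Bool.true_and, List.all_map]
      rfl
    have hrs : (rs.map (fun s => pyReduceInter (s.2.map Prod.snd))).all (fun u => u.contains x)
        = rs.all (fun s => pvIsArchCommon x s.2) := by
      rw [List.all_map]
      exact pv_all_mem_congr rs _ _
        (fun s hs => pv_contains_reduceInter s.2 (hinner s (List.mem_cons_of_mem r hs)) x)
    have hTot : pvIsTotalCommon (r :: rs) x
        = (pvIsArchCommon x r.2 && rs.all fun s => pvIsArchCommon x s.2) := by
      show (r :: rs).all _ = _
      rw [List.all_cons]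
    rw [hTot, hrs, ← hA, Bool.and_comm]

theorem pv_Row_eq (p : List (String × List (String × List String)))
    (hinner : ∀ r ∈ p, r.2 ≠ []) :
    pvRow p = p.map (fun r => (r.1, r.2.map (fun q =>
      (q.1, q.2.filter (fun x => !pvIsArchCommon x r.2))))) := by
  refine List.map_congr_left ?_
  intro r hr
  refine congrArg (fun l => (r.1, l)) ?_
  refine List.map_congr_left ?_
  intro q _
  refine congrArg (fun l => (q.1, l)) ?_
  show q.2.filter _ = q.2.filter _
  refine List.filter_congr ?_
  intro x _
  exact congrArg (fun b => !b) (pv_contains_reduceInter r.2 (hinner r hr) x)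

theorem pv_M2_eq (p : List (String × List (String × List String))) (hp : p ≠ [])
    (hinner : ∀ r ∈ p, r.2 ≠ []) :
    pvM2 p = p.map (fun r => (r.1, (pvFirstVal r.2 []).filter
      (fun x => pvIsArchCommon x r.2 && !pvIsTotalCommon p x))) := by
  show (p.map _).map _ = _
  rw [List.map_map]
  refine List.map_congr_left ?_
  intro r hr
  show (r.1, PySem.Set.diff (pyReduceInter (r.2.map Prod.snd)) (pvT p)) = _
  refine congrArg (fun l => (r.1, l)) ?_
  obtain ⟨q, qs, hr2⟩ := List.exists_cons_of_ne_nil (hinner r hr)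
  rw [hr2, List.map_cons, pv_reduceInter_eq]
  show (q.2.filter _).filter _ = (pvFirstVal (q :: qs) []).filter _
  rw [List.filter_filter]
  show _ = q.2.filter _
  refine List.filter_congr ?_
  intro x hx
  have hq : q.2.contains x = true := by
    rw [List.contains_eq_mem]; exact decide_eq_true hx
  have hA : pvIsArchCommon x (q :: qs) = (qs.map Prod.snd).all (fun u => u.contains x) := by
    show (q.2.contains x && qs.all _) = _
    rw [hq, Bool.true_and, List.all_map]
    rfl
  have hT : PySem.Set.contains (pvT p) x = pvIsTotalCommon p x :=
    pv_contains_T p hp hinner x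
  rw [hT, hA, Bool.and_comm]

theorem pv_insert_modify {V : Type} (d : PySem.Dict String V) (k : String) (v : V)
    (g : V → V) (dflt : V) : (d.insert k v).modify k dflt g = d.insert k (g v) := by
  show (d.insert k v).insert k (g ((d.insert k v).getD k dflt)) = _
  rw [PySem.Dict.getD_insert_self, pv_insert_insert_same]

theorem pv_B_eval (p : List (String × List (String × List String))) :
    commonProperties_py_alt p =
      ((PySem.Dict.mk (p.map (fun r => (r.1, r.2.map (fun q =>
          (q.1, q.2.filter (fun x => !pvIsArchCommon x r.2))))))).insert "All"
        (((PySem.Dict.mk (p.map (fun r => (r.1, (pvFirstVal r.2 []).filter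
            (fun x => pvIsArchCommon x r.2 && !pvIsTotalCommon p x))))).insert "All"
          ((pvFirstVal (pvFirstVal p []) []).filter (fun x => pvIsTotalCommon p x))).items)).items := by
  unfold commonProperties_py_alt
  dsimp only
  rw [pv_insert_modify]

theorem pv_unwrap_insert (raw : List (String × List (String × List String))) (k : String)
    (W : PySem.Dict String (List String)) :
    (((PySem.Dict.mk (raw.map (fun t => (t.1, PySem.Dict.mk t.2)))).insert k W).items).map
        (fun q => (q.1, q.2.items))
      = ((PySem.Dict.mk raw).insert k W.items).items := by
  have hcont : (PySem.Dict.mk (raw.map (fun t => (t.1, PySem.Dict.mk t.2)))).contains k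
      = (PySem.Dict.mk raw).contains k := by
    show (raw.map (fun t => (t.1, PySem.Dict.mk t.2))).any (fun p => p.1 == k)
        = raw.any (fun p => p.1 == k)
    rw [List.any_map]
    rfl
  by_cases hc : (PySem.Dict.mk raw).contains k = true
  · rw [PySem.Dict.items_insert_of_contains _ _ (hcont.trans hc),
      PySem.Dict.items_insert_of_contains _ _ hc, List.map_map, List.map_map]
    refine List.map_congr_left ?_
    intro t _
    by_cases htk : (t.1 == k) = true
    · simp [Function.comp, htk]
    · simp [Function.comp, htk]
  · have hcf : (PySem.Dict.mk raw).contains k = false := Bool.eq_false_iff.mpr hc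
    rw [PySem.Dict.items_insert_of_not_contains _ _ (hcont.trans hcf),
      PySem.Dict.items_insert_of_not_contains _ _ hcf, List.map_append, List.map_map]
    congr 1
    refine (List.map_congr_left ?_).trans (List.map_id _)
    intro t _
    rfl

theorem pv_A_eval (p : List (String × List (String × List String)))
    (hnd : (p.map Prod.fst).Nodup)
    (hinner : ∀ r ∈ p, (r.2.map Prod.fst).Nodup) :
    commonProperties_py p =
      ((PySem.Dict.mk ((pvRow p).map (fun t => (t.1, PySem.Dict.mk t.2)))).insert "All"
        ((PySem.Dict.mk (pvM2 p)).insert "All" (pvT p))).items.map (fun q => (q.1, q.2.items)) := by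
  have hndL : ((PySem.Dict.mk (p.map (fun r => (r.1, PySem.Dict.mk r.2)))).keys).Nodup := by
    show ((p.map (fun r => (r.1, PySem.Dict.mk r.2))).map Prod.fst).Nodup
    rw [List.map_map]; exact hnd
  have hndM : ((pvM p).map Prod.fst).Nodup := by
    unfold pvM; rw [List.map_map]; exact hnd
  have hndM2 : ((pvM2 p).map Prod.fst).Nodup := by
    unfold pvM2; rw [List.map_map]; exact hndM
  unfold commonProperties_py
  dsimp only
  -- loop 1: build commonPropertiePerArch
  have h1 : (PySem.Dict.mk (p.map (fun r => (r.1, PySem.Dict.mk r.2)))).keys.foldl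
      (fun cpa arch => cpa.insert arch (pyReduceInter
        ((PySem.Dict.mk (p.map (fun r => (r.1, PySem.Dict.mk r.2)))).getD arch PySem.Dict.empty).values))
      PySem.Dict.empty = PySem.Dict.mk (pvM p) := by
    have hb := pv_fold_build
      (f := fun arch => pyReduceInter (((PySem.Dict.mk (p.map (fun r => (r.1, PySem.Dict.mk r.2)))).getD arch PySem.Dict.empty).values))
      ((PySem.Dict.mk (p.map (fun r => (r.1, PySem.Dict.mk r.2)))).keys) PySem.Dict.empty (by exact hndL)
    refine hb.trans ?_
    apply PySem.Dict.ext
    show ((p.map (fun r => (r.1, PySem.Dict.mk r.2))).map Prod.fst).map _ = pvM p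
    rw [List.map_map, List.map_map]
    refine List.map_congr_left ?_
    intro r hr
    have hmem : (r.1, PySem.Dict.mk r.2)
        ∈ (PySem.Dict.mk (p.map (fun r => (r.1, PySem.Dict.mk r.2)))).items :=
      List.mem_map.2 ⟨r, hr, rfl⟩
    show (r.1, pyReduceInter _) = _
    rw [PySem.Dict.getD_of_mem_items _ hmem hndL]
    rfl
  rw [h1]
  -- loop 2: subtract total from each arch common
  have h2 : (PySem.Dict.mk (pvM p)).keys.foldl
      (fun c arch => c.insert arch (PySem.Set.diff (c.getD arch [])
        (pyReduceInter (PySem.Dict.mk (pvM p)).values))) (PySem.Dict.mk (pvM p))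
      = PySem.Dict.mk (pvM2 p) := by
    have hm := pv_fold_master
      (fun c arch => c.insert arch (PySem.Set.diff (c.getD arch [])
        (pyReduceInter (PySem.Dict.mk (pvM p)).values)))
      (fun a v => PySem.Set.diff v (pyReduceInter (PySem.Dict.mk (pvM p)).values))
      (fun _ => True)
      (by
        intro P a e hndP hmemP _
        dsimp only
        rw [show P.getD a [] = e from PySem.Dict.getD_of_mem_items _ hmemP hndP []])
      (pvM p) [] (by exact hndM) (fun _ _ => trivial)
    refine hm.trans ?_
    apply PySem.Dict.ext
    show (pvM p).map _ = pvM2 p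
    rfl
  rw [h2]
  -- loop 3: subtract total from every conf set
  have h3 : (PySem.Dict.mk (p.map (fun r => (r.1, PySem.Dict.mk r.2)))).keys.foldl
      (fun P arch => ((P.getD arch PySem.Dict.empty).keys).foldl
        (fun P' conf => P'.modify arch PySem.Dict.empty (fun inn =>
          inn.insert conf (PySem.Set.diff (inn.getD conf [])
            (pyReduceInter (PySem.Dict.mk (pvM p)).values)))) P)
      (PySem.Dict.mk (p.map (fun r => (r.1, PySem.Dict.mk r.2))))
      = PySem.Dict.mk (pvL3 p) := by
    have hm := pv_fold_master
      (fun P arch => ((P.getD arch PySem.Dict.empty).keys).foldl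
        (fun P' conf => P'.modify arch PySem.Dict.empty (fun inn =>
          inn.insert conf (PySem.Set.diff (inn.getD conf [])
            (pyReduceInter (PySem.Dict.mk (pvM p)).values)))) P)
      (fun a e => PySem.Dict.mk (e.items.map (fun q => (q.1, PySem.Set.diff q.2
        (pyReduceInter (PySem.Dict.mk (pvM p)).values)))))
      (fun e => e.keys.Nodup)
      (by
        intro P a e hndP hmemP hGood
        dsimp only
        have hget : P.getD a PySem.Dict.empty = e := PySem.Dict.getD_of_mem_items _ hmemP hndP _
        rw [hget]
        have hlift := pv_fold_inner_lift
          (fun inn c => inn.insert c (PySem.Set.diff (inn.getD c [])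
            (pyReduceInter (PySem.Dict.mk (pvM p)).values))) a PySem.Dict.empty
          e.keys P hndP ⟨e, hmemP⟩
        refine hlift.trans ?_
        rw [hget]
        refine congrArg (P.insert a) ?_
        have hin := pv_fold_master
          (fun inn c => inn.insert c (PySem.Set.diff (inn.getD c [])
            (pyReduceInter (PySem.Dict.mk (pvM p)).values)))
          (fun c v => PySem.Set.diff v (pyReduceInter (PySem.Dict.mk (pvM p)).values))
          (fun _ => True)
          (by
            intro Q c w hndQ hmemQ _
            dsimp only
            rw [show Q.getD c [] = w from PySem.Dict.getD_of_mem_items _ hmemQ hndQ []])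
          e.items [] (by exact hGood) (fun _ _ => trivial)
        exact hin)
      (p.map (fun r => (r.1, PySem.Dict.mk r.2))) [] (by exact hndL)
      (by
        intro t ht
        obtain ⟨r, hr, rfl⟩ := List.mem_map.1 ht
        show ((r.2.map Prod.fst)).Nodup
        exact hinner r hr)
    refine hm.trans ?_
    apply PySem.Dict.ext
    show (p.map (fun r => (r.1, PySem.Dict.mk r.2))).map _ = pvL3 p
    rw [List.map_map]
    rfl
  rw [h3]
  -- loop 4: subtract the arch common from every conf set
  have h4 : (PySem.Dict.mk (pvM2 p)).keys.foldl
      (fun P arch => ((P.getD arch PySem.Dict.empty).keys).foldl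
        (fun P' conf => P'.modify arch PySem.Dict.empty (fun inn =>
          inn.insert conf (PySem.Set.diff (inn.getD conf [])
            ((PySem.Dict.mk (pvM2 p)).getD arch [])))) P)
      (PySem.Dict.mk (pvL3 p))
      = PySem.Dict.mk (pvL4 p) := by
    have hkeys : (PySem.Dict.mk (pvM2 p)).keys = (pvL3 p).map Prod.fst := by
      show (pvM2 p).map Prod.fst = (pvL3 p).map Prod.fst
      unfold pvM2 pvM pvL3
      rw [List.map_map, List.map_map, List.map_map]
      rfl
    rw [hkeys]
    have hm := pv_fold_master
      (fun P arch => ((P.getD arch PySem.Dict.empty).keys).foldl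
        (fun P' conf => P'.modify arch PySem.Dict.empty (fun inn =>
          inn.insert conf (PySem.Set.diff (inn.getD conf [])
            ((PySem.Dict.mk (pvM2 p)).getD arch [])))) P)
      (fun a e => PySem.Dict.mk (e.items.map (fun q => (q.1, PySem.Set.diff q.2
        ((PySem.Dict.mk (pvM2 p)).getD a [])))))
      (fun e => e.keys.Nodup)
      (by
        intro P a e hndP hmemP hGood
        dsimp only
        have hget : P.getD a PySem.Dict.empty = e := PySem.Dict.getD_of_mem_items _ hmemP hndP _
        rw [hget]
        have hlift := pv_fold_inner_lift
          (fun inn c => inn.insert c (PySem.Set.diff (inn.getD c [])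
            ((PySem.Dict.mk (pvM2 p)).getD a []))) a PySem.Dict.empty
          e.keys P hndP ⟨e, hmemP⟩
        refine hlift.trans ?_
        rw [hget]
        refine congrArg (P.insert a) ?_
        have hin := pv_fold_master
          (fun inn c => inn.insert c (PySem.Set.diff (inn.getD c [])
            ((PySem.Dict.mk (pvM2 p)).getD a [])))
          (fun c v => PySem.Set.diff v ((PySem.Dict.mk (pvM2 p)).getD a []))
          (fun _ => True)
          (by
            intro Q c w hndQ hmemQ _
            dsimp only
            rw [show Q.getD c [] = w from PySem.Dict.getD_of_mem_items _ hmemQ hndQ []])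
          e.items [] (by exact hGood) (fun _ _ => trivial)
        exact hin)
      (pvL3 p) []
      (by
        show ((pvL3 p).map Prod.fst).Nodup
        unfold pvL3; rw [List.map_map]; exact hnd)
      (by
        intro t ht
        obtain ⟨r, hr, rfl⟩ := List.mem_map.1 ht
        show (((r.2.map (fun q => (q.1, PySem.Set.diff q.2 (pvT p)))).map Prod.fst)).Nodup
        rw [List.map_map]
        exact hinner r hr)
    refine hm.trans ?_
    apply PySem.Dict.ext
    show (pvL3 p).map _ = pvL4 p
    unfold pvL3 pvL4
    rw [List.map_map]
    refine List.map_congr_left ?_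
    intro r hr
    have hmemM2 : (r.1, PySem.Set.diff (pyReduceInter (r.2.map Prod.snd)) (pvT p))
        ∈ (PySem.Dict.mk (pvM2 p)).items := by
      show _ ∈ (pvM2 p)
      unfold pvM2 pvM
      rw [List.map_map]
      exact List.mem_map.2 ⟨r, hr, rfl⟩
    have hgetM2 : (PySem.Dict.mk (pvM2 p)).getD r.1 []
        = PySem.Set.diff (pyReduceInter (r.2.map Prod.snd)) (pvT p) :=
      PySem.Dict.getD_of_mem_items _ hmemM2 hndM2 []
    show (r.1, PySem.Dict.mk ((r.2.map (fun q => (q.1, PySem.Set.diff q.2 (pvT p)))).map _)) = _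
    rw [List.map_map, hgetM2]
    rfl
  rw [h4, pv_insert_modify]
  -- fold the two differences into one and unwrap
  have hL4row : pvL4 p = (pvRow p).map (fun t => (t.1, PySem.Dict.mk t.2)) := by
    unfold pvL4 pvRow
    rw [List.map_map]
    refine List.map_congr_left ?_
    intro r hr
    have hsub : ∀ x ∈ pvT p, x ∈ pyReduceInter (r.2.map Prod.snd) := by
      intro x hx
      refine pv_mem_reduceInter ((pvM p).map Prod.snd) _ ?_ x hx
      exact List.mem_map.2 ⟨(r.1, pyReduceInter (r.2.map Prod.snd)), List.mem_map.2 ⟨r, hr, rfl⟩, rfl⟩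
    show (r.1, _) = (r.1, _)
    congr 1
    show PySem.Dict.mk _ = PySem.Dict.mk _
    congr 1
    refine List.map_congr_left ?_
    intro q _
    rw [pv_diff_diff q.2 (pvT p) (pyReduceInter (r.2.map Prod.snd)) hsub]
  rw [hL4row]
  rfl

-- ===== VERDICT (by name: the statement is the Claim_ definition above) =====
theorem commonProperties_py_spec : Claim_equal_commonProperties_py := by
  intro p _ hpre
  obtain ⟨hne, hnd, hinner⟩ := hpre
  have hinner1 : ∀ r ∈ p, r.2 ≠ [] := fun r hr => (hinner r hr).1
  unfold Spec_commonProperties_py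
  rw [pv_A_eval p hnd (fun r hr => (hinner r hr).2), pv_unwrap_insert, pv_B_eval,
    pv_Row_eq p hinner1, pv_M2_eq p hne hinner1, pv_T_eq p hne hinner1]
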